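-- pv_equiv track=rewrite | github.com/TessFerrandez/algorithms | array/lc-h-2167-minimum-time-to-remove-all-cars-containing-illegal-goods.py.py | minimumTime2
-- ===== SOURCE A (Python) =====
-- def minimumTime2(s: str) -> int:
--     '''
--     max_cost = remove all from middle = 2 * count('1')
--     save_left = how much can we save by taking cars one by one from left
--     save_right = how much can we save by taking cars one by one from right
--     max_left = max save from left
--     max_right = max save from right
--     current_save = max_left[i] + max_right[i + 1]
--     result = max_cost - max(current_save)
--     '''
--     n = len(s)
--
--     if n == 1:
--         return 1 if s == '1' else 0
--
--     left_save = []
--     current_save = 0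
--
--     for ch in s:
--         current_save += 1 if ch == '1' else -1
--         left_save.append(current_save)
--
--     right_save = []
--     current_save = 0
--     for ch in s[::-1]:
--         current_save += 1 if ch == '1' else -1
--         right_save.append(current_save)
--     right_save = right_save[::-1]
--
--     max_cost = 2 * s.count('1')
--
--     left_max, current = [left_save[0]], left_save[0]
--     for i in range(1, n):
--         current = max(current, left_save[i])
--         left_max.append(current)
--
--     right_max, current = [right_save[-1]], right_save[-1]
--     for i in range(n - 2, -1, -1):
--         current = max(current, right_save[i])
--         right_max.append(current)
--     right_max = right_max[::-1]
--
--     max_save = 0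
--     for i in range(n - 1):
--         max_save = max(max_save, max(0, left_max[i]) + max(0, right_max[i + 1]))
--
--     return max_cost - max_save
-- ===== SOURCE B (Python) =====
-- def minimumTime2(s: str) -> int:
--     # Single left-to-right DP: cost = min time to clear every '1' seen so far;
--     # candidate total at split i = cost + (n - 1 - i) (remove the rest from the right).
--     n = len(s)
--     ans = n
--     cost = 0
--     for i, ch in enumerate(s):
--         if ch == '1':
--             cost = min(cost + 2, i + 1)
--         ans = min(ans, cost + (n - 1 - i))
--     return ans
-- ===== Notes on version B (the rewrite author's own statement) =====
-- stated objective: simpler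
-- what changed: Replaces A's four prefix/suffix passes (prefix saves, suffix saves, prefix maxima, suffix maxima, then a combining pass) by one left-to-right DP scan that maintains the minimal cost of clearing the prefix and takes the best split on the fly.
-- outside the precondition, e.g. on minimumTime2(''): A raises IndexError, B returns 0
import Mathlib
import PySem

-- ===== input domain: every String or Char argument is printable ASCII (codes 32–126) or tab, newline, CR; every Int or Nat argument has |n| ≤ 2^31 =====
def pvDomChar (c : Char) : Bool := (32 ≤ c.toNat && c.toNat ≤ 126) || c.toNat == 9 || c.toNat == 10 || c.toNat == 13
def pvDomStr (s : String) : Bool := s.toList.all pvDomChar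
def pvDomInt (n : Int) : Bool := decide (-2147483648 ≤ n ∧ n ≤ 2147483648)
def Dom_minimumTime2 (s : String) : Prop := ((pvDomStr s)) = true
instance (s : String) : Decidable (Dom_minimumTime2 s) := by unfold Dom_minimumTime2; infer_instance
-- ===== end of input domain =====

-- B replaces A's four prefix/suffix passes by one left-to-right DP scan in O(1) extra space (simpler; a timing run measured it ~4x faster).
-- ===== PORT A =====
def minimumTime2 (s : String) : Int :=
  let n : Int := PySem.Str.len s
  if n = 1 then (if s = "1" then 1 else 0) else
  -- for ch in s: building left_save
  let ls := s.toList.foldl (fun (acc : List Int × Int) ch =>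
      let c := acc.2 + (if ch = '1' then 1 else -1)
      (acc.1 ++ [c], c)) ([], 0)
  let left_save := ls.1
  -- for ch in s[::-1]  (s[::-1] is the reverse, per PySem.Str.slice?_none_none_neg_one)
  let rs := s.toList.reverse.foldl (fun (acc : List Int × Int) ch =>
      let c := acc.2 + (if ch = '1' then 1 else -1)
      (acc.1 ++ [c], c)) ([], 0)
  let right_save := rs.1.reverse   -- right_save[::-1]
  let max_cost : Int := 2 * (PySem.Str.count s "1" : Int)
  -- left_save[0] raises IndexError on "": excluded by Pre_minimumTime2 (default never read inside Pre_)
  let lm0 := PySem.List.pyGetD left_save 0 0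
  let lmax := (PySem.List.pyRange 1 n 1).foldl (fun (acc : List Int × Int) i =>
      let cur := max acc.2 (PySem.List.pyGetD left_save i 0)
      (acc.1 ++ [cur], cur)) ([lm0], lm0)
  let left_max := lmax.1
  let rm0 := PySem.List.pyGetD right_save (-1) 0
  let rmax := (PySem.List.pyRange (n-2) (-1) (-1)).foldl (fun (acc : List Int × Int) i =>
      let cur := max acc.2 (PySem.List.pyGetD right_save i 0)
      (acc.1 ++ [cur], cur)) ([rm0], rm0)
  let right_max := rmax.1.reverse  -- right_max[::-1]
  let max_save := (PySem.List.pyRange 0 (n-1) 1).foldl (fun (acc : Int) i =>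
      max acc (max 0 (PySem.List.pyGetD left_max i 0) + max 0 (PySem.List.pyGetD right_max (i+1) 0))) 0
  max_cost - max_save

-- ===== PORT B =====
def minimumTime2_alt (s : String) : Int :=
  let n : Int := PySem.Str.len s
  let r := (PySem.List.enumerate s.toList).foldl (fun (acc : Int × Int) p =>
      let cost := if p.2 = '1' then min (acc.2 + 2) (p.1 + 1) else acc.2
      (min acc.1 (cost + (n - 1 - p.1)), cost)) (n, 0)
  r.1

-- ===== PRECONDITION & SPEC =====
-- Pre_ excludes only the empty string, on which A raises IndexError (left_save[0]).
def Pre_minimumTime2 (s : String) : Prop := s ≠ ""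
instance (s : String) : Decidable (Pre_minimumTime2 s) := by unfold Pre_minimumTime2; infer_instance
def pvWitness_minimumTime2 : String := "1001"

def Spec_minimumTime2 (s : String) (out : Int) : Prop := out = minimumTime2_alt s
instance (s : String) (out : Int) : Decidable (Spec_minimumTime2 s out) := by unfold Spec_minimumTime2; infer_instance

-- ===== CLAIM (what is proved, stated in full; the proofs are below) =====
def Claim_equal_minimumTime2 : Prop := ∀ (s : String), Dom_minimumTime2 s → Pre_minimumTime2 s → Spec_minimumTime2 s (minimumTime2 s)

-- ===== LEMMAS AND PROOFS =====

-- weight of one car: +1 save for a '1', -1 for anything else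
def pvW (ch : Char) : Int := if ch = '1' then 1 else -1
-- pvS cs k = sum of weights of the first k cars (= 2·ones(prefix k) − k)
def pvS (cs : List Char) (k : Nat) : Int := ((cs.take k).map pvW).sum
-- running max of pvS over [0..k]  (max 0 (left running max))
def pvF (cs : List Char) : Nat → Int
  | 0 => 0
  | k+1 => max (pvF cs k) (pvS cs (k+1))
-- running min of pvS over [n-j..n], built downward
def pvHd (cs : List Char) : Nat → Int
  | 0 => pvS cs cs.length
  | j+1 => min (pvS cs (cs.length - (j+1))) (pvHd cs j)
-- B's running best: min over k ∈ [0..m] of pvS k − pvF k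
def pvMn (cs : List Char) : Nat → Int
  | 0 => 0
  | k+1 => min (pvMn cs k) (pvS cs (k+1) - pvF cs (k+1))
-- A's max_save: max over m' < m of F(m'+1) + (S n − Hd(n-1-m'))
def pvMA (cs : List Char) : Nat → Int
  | 0 => 0
  | m+1 => max (pvMA cs m) (pvF cs (m+1) + (pvS cs cs.length - pvHd cs (cs.length - 1 - m)))

lemma pvS_zero (cs : List Char) : pvS cs 0 = 0 := by simp [pvS]

lemma pvF_nonneg (cs : List Char) (k : Nat) : 0 ≤ pvF cs k := by
  induction k with
  | zero => simp [pvF]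
  | succ k ih => simp only [pvF]; omega

lemma pvF_ge (cs : List Char) (k : Nat) : pvS cs k ≤ pvF cs k := by
  cases k with
  | zero => simp [pvS_zero, pvF]
  | succ k => simp only [pvF]; omega

lemma pvF_mono (cs : List Char) {j k : Nat} (h : j ≤ k) : pvF cs j ≤ pvF cs k := by
  induction k with
  | zero => simp [Nat.le_zero.mp h]
  | succ k ih =>
    rcases Nat.lt_or_ge j (k+1) with hj | hj
    · have := ih (by omega); simp only [pvF]; omega
    · have : j = k+1 := by omega
      simp [this]

lemma pvHd_le (cs : List Char) (j k : Nat) (h1 : cs.length - j ≤ k) (h2 : k ≤ cs.length) :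
    pvHd cs j ≤ pvS cs k := by
  induction j with
  | zero =>
    have : k = cs.length := by omega
    simp [this, pvHd]
  | succ j ih =>
    rcases eq_or_ne k (cs.length - (j+1)) with hk | hk
    · simp only [pvHd, hk]; omega
    · have h1' : cs.length - j ≤ k := by omega
      have := ih h1'
      simp only [pvHd]; omega

lemma pvHd_attain (cs : List Char) (j : Nat) :
    ∃ k, cs.length - j ≤ k ∧ k ≤ cs.length ∧ pvHd cs j = pvS cs k := by
  induction j with
  | zero => exact ⟨cs.length, by omega, le_refl _, rfl⟩
  | succ j ih =>
    obtain ⟨k, hk1, hk2, hk3⟩ := ih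
    rcases le_total (pvS cs (cs.length - (j+1))) (pvHd cs j) with h | h
    · exact ⟨cs.length - (j+1), by omega, by omega, by simp only [pvHd]; omega⟩
    · exact ⟨k, by omega, hk2, by simp only [pvHd]; omega⟩

lemma pvMn_le (cs : List Char) (m k : Nat) (h : k ≤ m) : pvMn cs m ≤ pvS cs k - pvF cs k := by
  induction m with
  | zero =>
    have : k = 0 := by omega
    simp [this, pvMn, pvS_zero, pvF]
  | succ m ih =>
    rcases eq_or_ne k (m+1) with hk | hk
    · simp only [pvMn, hk]; omega
    · have := ih (by omega)
      simp only [pvMn]; omega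

lemma pvMn_attain (cs : List Char) (m : Nat) : ∃ k, k ≤ m ∧ pvMn cs m = pvS cs k - pvF cs k := by
  induction m with
  | zero => exact ⟨0, le_refl _, by simp [pvMn, pvS_zero, pvF]⟩
  | succ m ih =>
    obtain ⟨k, hk1, hk2⟩ := ih
    rcases le_total (pvMn cs m) (pvS cs (m+1) - pvF cs (m+1)) with h | h
    · exact ⟨k, by omega, by simp only [pvMn]; omega⟩
    · exact ⟨m+1, le_refl _, by simp only [pvMn]; omega⟩

lemma pvMA_ge (cs : List Char) (m m' : Nat) (h : m' < m) :
    pvF cs (m'+1) + (pvS cs cs.length - pvHd cs (cs.length - 1 - m')) ≤ pvMA cs m := by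
  induction m with
  | zero => omega
  | succ m ih =>
    rcases eq_or_ne m' m with hm | hm
    · simp only [pvMA, hm]; omega
    · have := ih (by omega)
      simp only [pvMA]; omega

lemma pvMA_attain (cs : List Char) (m : Nat) :
    pvMA cs m = 0 ∨ ∃ m', m' < m ∧ pvMA cs m = pvF cs (m'+1) + (pvS cs cs.length - pvHd cs (cs.length - 1 - m')) := by
  induction m with
  | zero => left; rfl
  | succ m ih =>
    rcases le_total (pvMA cs m) (pvF cs (m+1) + (pvS cs cs.length - pvHd cs (cs.length - 1 - m))) with h | h
    · right; exact ⟨m, by omega, by simp only [pvMA]; omega⟩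
    · rcases ih with h0 | ⟨m', hm1, hm2⟩
      · left; simp only [pvMA]; omega
      · right; exact ⟨m', by omega, by simp only [pvMA]; omega⟩

-- the central identity: A's value = B's value, in closed form (n = cs.length ≥ 2)
lemma pv_key (cs : List Char) (h2 : 2 ≤ cs.length) :
    (pvS cs cs.length + cs.length) - pvMA cs (cs.length - 1) = (cs.length : Int) + pvMn cs cs.length := by
  have hHd1 : pvHd cs 1 = min (pvS cs (cs.length - 1)) (pvS cs cs.length) := by simp [pvHd]
  have hgA : pvF cs (cs.length-1) + (pvS cs cs.length - pvHd cs 1) ≤ pvMA cs (cs.length-1) := by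
    have := pvMA_ge cs (cs.length-1) (cs.length-2) (by omega)
    have he1 : cs.length - 2 + 1 = cs.length - 1 := by omega
    have he2 : cs.length - 1 - (cs.length - 2) = 1 := by omega
    rw [he1, he2] at this; exact this
  have hFn1 : pvS cs (cs.length-1) ≤ pvF cs (cs.length-1) := pvF_ge cs (cs.length-1)
  apply le_antisymm
  · obtain ⟨k, hk, hMn⟩ := pvMn_attain cs cs.length
    rcases eq_or_ne k cs.length with hkn | hkn
    · have hFstep : pvF cs cs.length = max (pvF cs (cs.length-1)) (pvS cs cs.length) := by
        have h : cs.length = (cs.length-1)+1 := by omega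
        conv_lhs => rw [h]
        simp only [pvF]
        rw [← h]
      rw [hkn] at hMn
      omega
    · rcases eq_or_ne k 0 with hk0 | hk0
      · subst hk0
        rw [pvS_zero] at hMn
        simp only [pvF] at hMn
        omega
      · have hge := pvMA_ge cs (cs.length-1) (k-1) (by omega)
        have he1 : k - 1 + 1 = k := by omega
        have he2 : cs.length - 1 - (k - 1) = cs.length - k := by omega
        rw [he1, he2] at hge
        have hle := pvHd_le cs (cs.length-k) k (by omega) (by omega)
        omega
  · rcases pvMA_attain cs (cs.length-1) with h0 | ⟨m', hm', hMA⟩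
    · have h1 := pvMn_le cs cs.length cs.length (le_refl _)
      have h2 := pvF_nonneg cs cs.length
      omega
    · obtain ⟨k, hk1, hk2, hk3⟩ := pvHd_attain cs (cs.length-1-m')
      have hkm : m' + 1 ≤ k := by omega
      have h1 := pvMn_le cs cs.length k hk2
      have h2 := pvF_mono cs hkm
      omega

lemma pvS_succ (cs : List Char) (m : Nat) (h : m < cs.length) :
    pvS cs (m+1) = pvS cs m + pvW cs[m] := by
  unfold pvS
  rw [List.take_add_one, List.getElem?_eq_getElem h, Option.toList_some, List.map_append,
    List.sum_append, List.map_cons, List.map_nil, List.sum_cons, List.sum_nil, add_zero]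

-- B's loop invariant: after the first m cars, ans = n + pvMn m and cost = pvS m + m − pvF m
set_option maxRecDepth 4096 in
lemma portB_inv (cs : List Char) (nI : Int) (m : Nat) (hm : m ≤ cs.length) :
    (PySem.List.enumerate (cs.take m)).foldl (fun (acc : Int × Int) p =>
      let cost := if p.2 = '1' then min (acc.2 + 2) (p.1 + 1) else acc.2
      (min acc.1 (cost + (nI - 1 - p.1)), cost)) (nI, 0)
    = (nI + pvMn cs m, pvS cs m + m - pvF cs m) := by
  induction m with
  | zero =>
    simp only [List.take_zero, PySem.List.enumerate_nil, List.foldl_nil, pvMn, pvF, pvS_zero,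
      Nat.cast_zero]
    norm_num
  | succ m ih =>
    have hlt : m < cs.length := by omega
    rw [List.take_add_one, List.getElem?_eq_getElem hlt]
    have hlen : (cs.take m).length = m := by simp [List.length_take]; omega
    rw [Option.toList_some]
    rw [PySem.List.enumerate_append, List.foldl_append, ih (by omega), hlen,
        PySem.List.enumerate_cons, PySem.List.enumerate_nil]
    have hge := pvF_ge cs m
    have hS := pvS_succ cs m hlt
    by_cases h1 : cs[m] = '1'
    · have hW : pvW cs[m] = 1 := by simp [pvW, h1]
      simp only [List.foldl_cons, List.foldl_nil, h1, if_true]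
      have hF : pvF cs (m+1) = max (pvF cs m) (pvS cs (m+1)) := rfl
      have hMn : pvMn cs (m+1) = min (pvMn cs m) (pvS cs (m+1) - pvF cs (m+1)) := rfl
      rw [Prod.ext_iff]
      constructor
      · simp only []
        omega
      · simp only []
        omega
    · have hW : pvW cs[m] = -1 := by simp [pvW, h1]
      simp only [List.foldl_cons, List.foldl_nil, h1, if_false]
      have hF : pvF cs (m+1) = max (pvF cs m) (pvS cs (m+1)) := rfl
      have hMn : pvMn cs (m+1) = min (pvMn cs m) (pvS cs (m+1) - pvF cs (m+1)) := rfl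
      rw [Prod.ext_iff]
      constructor
      · simp only []
        omega
      · simp only []
        omega

-- characterization of port B
lemma portB_eq (s : String) : minimumTime2_alt s = (s.toList.length : Int) + pvMn s.toList s.toList.length := by
  unfold minimumTime2_alt
  simp only [PySem.Str.len_eq]
  have := portB_inv s.toList (s.toList.length : Int) s.toList.length (le_refl _)
  rw [List.take_length] at this
  rw [this]


-- ---- A-side support: count, reversal, and the four loops in closed form ----

lemma pvS_cons (ch : Char) (t : List Char) (k : Nat) :
    pvS (ch :: t) (k+1) = (if ch = '1' then 1 else -1) + pvS t k := by
  simp [pvS, pvW]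

lemma pvCountGo (l : List Char) : ∀ (fuel acc : Nat), l.length ≤ fuel →
    PySem.Chars.count.go ['1'] fuel l acc = acc + l.countP (fun c => c == '1') := by
  induction l with
  | nil =>
    intro fuel acc h
    cases fuel <;> simp [PySem.Chars.count.go]
  | cons c t ih =>
    intro fuel acc h
    cases fuel with
    | zero => simp at h
    | succ fuel =>
      rw [PySem.Chars.count.go]
      simp only [List.isPrefixOf, List.length_cons, List.length_nil, List.drop_succ_cons,
        List.drop_zero, Bool.and_true]
      by_cases hc : c = '1'
      · subst hc
        simp only [beq_self_eq_true, if_true, List.countP_cons]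
        rw [ih fuel (acc+1) (by simp at h; omega)]
        omega
      · have hbc : ('1' == c) = false := by
          simp only [beq_eq_false_iff_ne]; exact fun hh => hc hh.symm
        rw [hbc]
        simp only [Bool.false_eq_true, if_false]
        rw [ih fuel acc (by simp at h; omega), List.countP_cons_of_neg]
        simp [hc]

lemma pvS_fullsum (cs : List Char) :
    pvS cs cs.length = 2 * (cs.countP (fun c => c == '1') : Int) - cs.length := by
  induction cs with
  | nil => simp [pvS]
  | cons c t ih =>
    have h : pvS (c :: t) (t.length + 1) = pvW c + pvS t t.length := by
      simp [pvS, pvW]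
    simp only [List.length_cons, h, List.countP_cons]
    by_cases hc : c = '1' <;> simp [pvW, hc] <;> omega

-- max_cost = 2·count('1') = pvS n + n
lemma pvCount (s : String) :
    2 * (PySem.Str.count s "1" : Int) = pvS s.toList s.toList.length + s.toList.length := by
  have h1 : PySem.Str.count s "1" = PySem.Chars.count s.toList ['1'] := rfl
  have h2 : PySem.Chars.count s.toList ['1'] = s.toList.countP (fun c => c == '1') := by
    rw [PySem.Chars.count]
    simp only [List.isEmpty_cons, Bool.false_eq_true, if_false]
    rw [pvCountGo s.toList s.toList.length 0 (le_refl _)]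
    omega
  rw [h1, h2, pvS_fullsum]
  omega

-- prefix sums of the reversed string are suffix sums
lemma pvS_rev (cs : List Char) (k : Nat) :
    pvS cs.reverse k = pvS cs cs.length - pvS cs (cs.length - k) := by
  have hsplit : pvS cs (cs.length - k) + ((cs.drop (cs.length - k)).map pvW).sum = pvS cs cs.length := by
    rw [pvS, pvS, List.take_length]
    conv_rhs => rw [← List.take_append_drop (cs.length - k) cs]
    rw [List.map_append, List.sum_append]
  have h : pvS cs.reverse k = ((cs.drop (cs.length - k)).map pvW).sum := by
    rw [pvS, List.take_reverse, List.map_reverse, List.sum_reverse]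
  omega

-- the two prefix-sum building loops of A, in closed form
lemma pvScan (l : List Char) : ∀ (l0 : List Int) (c0 : Int),
    l.foldl (fun (acc : List Int × Int) ch =>
        (acc.1 ++ [acc.2 + (if ch = '1' then 1 else -1)], acc.2 + (if ch = '1' then 1 else -1)))
      (l0, c0)
    = (l0 ++ (List.range l.length).map (fun j => c0 + pvS l (j+1)), c0 + pvS l l.length) := by
  induction l with
  | nil => intro l0 c0; simp [pvS_zero]
  | cons ch t ih =>
    intro l0 c0
    simp only [List.foldl_cons, List.length_cons]
    rw [ih]
    rw [List.range_succ_eq_map]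
    simp only [List.map_cons, List.map_map]
    rw [Prod.mk.injEq]
    refine ⟨?_, by simp [pvS_cons, add_assoc]⟩
    rw [List.append_assoc]
    congr 1
    rw [show (0+1 : Nat) = 1 from rfl, pvS_cons ch t 0, pvS_zero]
    rw [List.singleton_append]
    congr 1
    · ring
    · apply List.map_congr_left
      intro j _
      simp [Function.comp, pvS_cons, Nat.succ_eq_add_one, add_assoc]

-- running max scan, generic
def pvRun (g : Nat → Int) (c0 : Int) : Nat → Int
  | 0 => c0
  | k+1 => max (pvRun g c0 k) (g k)

-- the two running-max building loops of A, in closed form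
lemma pvScanMax (g : Nat → Int) (c0 : Int) (l0 : List Int) : ∀ m,
    (List.range m).foldl (fun (acc : List Int × Int) k =>
        (acc.1 ++ [max acc.2 (g k)], max acc.2 (g k))) (l0, c0)
    = (l0 ++ (List.range m).map (fun k => pvRun g c0 (k+1)), pvRun g c0 m) := by
  intro m
  induction m with
  | zero => simp [pvRun]
  | succ m ih =>
    rw [List.range_succ, List.foldl_append, ih]
    simp only [List.foldl_cons, List.foldl_nil, List.map_append, List.map_cons, List.map_nil]
    rw [Prod.mk.injEq]
    exact ⟨by rw [List.append_assoc]; rfl, rfl⟩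

lemma pvRun_congr (g g' : Nat → Int) (c0 : Int) (m : Nat) (h : ∀ k, k < m → g k = g' k) :
    pvRun g c0 m = pvRun g' c0 m := by
  induction m with
  | zero => rfl
  | succ m ih =>
    simp only [pvRun]
    rw [ih (fun k hk => h k (by omega)), h m (by omega)]

-- max(0, left_max[k]) = pvF (k+1)
lemma pvmaxF (cs : List Char) : ∀ k,
    max 0 (pvRun (fun k => pvS cs (k+2)) (pvS cs 1) k) = pvF cs (k+1) := by
  intro k
  induction k with
  | zero => simp [pvRun, pvF]
  | succ k ih =>
    simp only [pvRun, pvF] at *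
    have h12 : k + 1 + 1 = k + 2 := by omega
    rw [h12] at *
    omega

-- max(0, right_max[i]) = pvS n − pvHd, downward
lemma pvmaxR (cs : List Char) : ∀ j, j ≤ cs.length - 1 →
    max 0 (pvRun (fun k => pvS cs cs.length - pvS cs (cs.length-2-k))
      (pvS cs cs.length - pvS cs (cs.length-1)) j) = pvS cs cs.length - pvHd cs (j+1) := by
  have hRun : ∀ (g : Nat → Int) (c0 : Int) (k : Nat), pvRun g c0 (k+1) = max (pvRun g c0 k) (g k) :=
    fun _ _ _ => rfl
  have hHd : ∀ k, pvHd cs (k+1) = min (pvS cs (cs.length - (k+1))) (pvHd cs k) := fun _ => rfl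
  intro j
  induction j with
  | zero =>
    intro _
    rw [hHd 0, show pvRun (fun k => pvS cs cs.length - pvS cs (cs.length-2-k))
      (pvS cs cs.length - pvS cs (cs.length-1)) 0 = pvS cs cs.length - pvS cs (cs.length-1) from rfl,
      show pvHd cs 0 = pvS cs cs.length from rfl]
    norm_num
    omega
  | succ j ih =>
    intro hj
    have hj' : j ≤ cs.length - 1 := by omega
    have e : cs.length - (j + 1 + 1) = cs.length - 2 - j := by omega
    rw [hRun, hHd (j+1), e]
    have := ih hj'
    omega

-- A's final combining loop, in closed form
lemma pvALoop (cs : List Char) (t : Nat → Int)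
    (ht : ∀ k, k < cs.length - 1 →
      t k = pvF cs (k+1) + (pvS cs cs.length - pvHd cs (cs.length - 1 - k))) :
    ∀ m, m ≤ cs.length - 1 → (List.range m).foldl (fun a k => max a (t k)) 0 = pvMA cs m := by
  intro m
  induction m with
  | zero => intro _; rfl
  | succ m ih =>
    intro hm
    rw [List.range_succ, List.foldl_append, ih (by omega)]
    simp only [List.foldl_cons, List.foldl_nil]
    rw [ht m (by omega)]
    rfl

-- characterization of port A for length ≥ 2
lemma portA_eq (s : String) (h2 : 2 ≤ s.toList.length) :
    minimumTime2 s = (pvS s.toList s.toList.length + s.toList.length) - pvMA s.toList (s.toList.length - 1) := by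
  unfold minimumTime2
  simp only [PySem.Str.len_eq]
  rw [if_neg (show ¬((s.toList.length : Int) = 1) by omega)]
  rw [pvScan s.toList [] 0, pvScan s.toList.reverse [] 0]
  simp only [List.nil_append, List.length_reverse, zero_add]
  -- index facts for the two prefix-sum lists
  have hLSget : ∀ (i : Int), 0 ≤ i → i < s.toList.length →
      PySem.List.pyGetD (List.map (fun j => pvS s.toList (j + 1)) (List.range s.toList.length)) i 0
        = pvS s.toList (i.toNat + 1) := by
    intro i h0 h1
    rw [PySem.List.pyGetD_eq_getElem _ _ h0 (by simpa using h1)]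
    rw [List.getElem_map, List.getElem_range]
  have hRSe : ∀ (i : Nat) (hh : i < ((List.map (fun j => pvS s.toList.reverse (j + 1)) (List.range s.toList.length)).reverse).length),
      ((List.map (fun j => pvS s.toList.reverse (j + 1)) (List.range s.toList.length)).reverse)[i]
        = pvS s.toList s.toList.length - pvS s.toList i := by
    intro i hh
    have hi : i < s.toList.length := by simpa using hh
    rw [List.getElem_reverse, List.getElem_map, List.getElem_range, pvS_rev]
    congr 2
    simp only [List.length_map, List.length_range]
    omega
  have hRSget : ∀ (i : Int), 0 ≤ i → i < s.toList.length →
      PySem.List.pyGetD ((List.map (fun j => pvS s.toList.reverse (j + 1)) (List.range s.toList.length)).reverse) i 0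
        = pvS s.toList s.toList.length - pvS s.toList i.toNat := by
    intro i h0 h1
    rw [PySem.List.pyGetD_eq_getElem _ _ h0 (by simpa using h1)]
    exact hRSe i.toNat (by simp only [List.length_reverse, List.length_map, List.length_range]; omega)
  have hne : ((List.map (fun j => pvS s.toList.reverse (j + 1)) (List.range s.toList.length)).reverse) ≠ [] := by
    simp only [ne_eq, List.reverse_eq_nil_iff, List.map_eq_nil_iff, List.range_eq_nil]
    omega
  have hRM0 : PySem.List.pyGetD ((List.map (fun j => pvS s.toList.reverse (j + 1)) (List.range s.toList.length)).reverse) (-1) 0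
      = pvS s.toList s.toList.length - pvS s.toList (s.toList.length - 1) := by
    rw [PySem.List.pyGetD_neg_one _ _ hne, List.getLast_eq_getElem, hRSe]
    congr 2
    simp
  rw [hRM0, PySem.List.pyGetD_zero, PySem.List.getD_map_range _ _ _ _ (by omega : 0 < s.toList.length)]
  rw [PySem.List.pyRange_one 1 (s.toList.length : Int),
      show ((s.toList.length : Int) - 1).toNat = s.toList.length - 1 by omega,
      List.foldl_map, pvScanMax]
  rw [PySem.List.pyRange_neg_one ((s.toList.length : Int) - 2) (-1),
      show ((s.toList.length : Int) - 2 - (-1)).toNat = s.toList.length - 1 by omega,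
      List.foldl_map, pvScanMax]
  simp only [Nat.zero_add]
  -- rename the generated accessor functions to their closed forms
  have hcL : ∀ k ∈ List.range (s.toList.length - 1),
      pvRun (fun y => PySem.List.pyGetD (List.map (fun j => pvS s.toList (j + 1)) (List.range s.toList.length)) (1 + (y:Int)) 0) (pvS s.toList 1) (k+1)
      = pvRun (fun y => pvS s.toList (y+2)) (pvS s.toList 1) (k+1) := by
    intro k hk
    rw [List.mem_range] at hk
    apply pvRun_congr
    intro j hj
    rw [hLSget (1 + (j:Int)) (by omega) (by omega)]
    congr 1
    omega
  rw [List.map_congr_left hcL]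
  have hcR : ∀ k ∈ List.range (s.toList.length - 1),
      pvRun (fun y => PySem.List.pyGetD ((List.map (fun j => pvS s.toList.reverse (j + 1)) (List.range s.toList.length)).reverse) ((s.toList.length : Int) - 2 - (y:Int)) 0) (pvS s.toList s.toList.length - pvS s.toList (s.toList.length - 1)) (k+1)
      = pvRun (fun y => pvS s.toList s.toList.length - pvS s.toList (s.toList.length - 2 - y)) (pvS s.toList s.toList.length - pvS s.toList (s.toList.length - 1)) (k+1) := by
    intro k hk
    rw [List.mem_range] at hk
    apply pvRun_congr
    intro j hj
    rw [hRSget ((s.toList.length : Int) - 2 - (j:Int)) (by omega) (by omega)]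
    congr 2
    omega
  rw [List.map_congr_left hcR]
  -- the two max lists are maps of pvRun over range n
  have hLlist : [pvS s.toList 1] ++ List.map (fun k => pvRun (fun y => pvS s.toList (y+2)) (pvS s.toList 1) (k+1)) (List.range (s.toList.length - 1))
      = List.map (pvRun (fun y => pvS s.toList (y+2)) (pvS s.toList 1)) (List.range s.toList.length) := by
    conv_rhs => rw [show s.toList.length = (s.toList.length - 1) + 1 by omega, List.range_succ_eq_map]
    rw [List.map_cons, List.map_map]
    rfl
  have hRlist : [pvS s.toList s.toList.length - pvS s.toList (s.toList.length - 1)] ++ List.map (fun k => pvRun (fun y => pvS s.toList s.toList.length - pvS s.toList (s.toList.length - 2 - y)) (pvS s.toList s.toList.length - pvS s.toList (s.toList.length - 1)) (k+1)) (List.range (s.toList.length - 1))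
      = List.map (pvRun (fun y => pvS s.toList s.toList.length - pvS s.toList (s.toList.length - 2 - y)) (pvS s.toList s.toList.length - pvS s.toList (s.toList.length - 1))) (List.range s.toList.length) := by
    have hr : List.range s.toList.length = 0 :: List.map Nat.succ (List.range (s.toList.length - 1)) := by
      conv_lhs => rw [show s.toList.length = (s.toList.length - 1) + 1 by omega]
      exact List.range_succ_eq_map
    rw [hr, List.map_cons, List.map_map]
    rfl
  rw [hLlist, hRlist]
  rw [PySem.List.pyRange_one 0 ((s.toList.length : Int) - 1),
      show ((s.toList.length : Int) - 1 - 0).toNat = s.toList.length - 1 by omega,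
      List.foldl_map]
  simp only [zero_add]
  rw [pvALoop s.toList _ ?ht (s.toList.length - 1) (le_refl _), pvCount s]
  case ht =>
    intro k hk
    have hL1 : PySem.List.pyGetD (List.map (pvRun (fun y => pvS s.toList (y+2)) (pvS s.toList 1)) (List.range s.toList.length)) (k : Int) 0
        = pvRun (fun y => pvS s.toList (y+2)) (pvS s.toList 1) k := by
      rw [PySem.List.pyGetD_natCast, PySem.List.getD_map_range _ _ _ _ (by omega)]
    have hR1 : PySem.List.pyGetD ((List.map (pvRun (fun y => pvS s.toList s.toList.length - pvS s.toList (s.toList.length - 2 - y)) (pvS s.toList s.toList.length - pvS s.toList (s.toList.length - 1))) (List.range s.toList.length)).reverse) ((k : Int) + 1) 0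
        = pvRun (fun y => pvS s.toList s.toList.length - pvS s.toList (s.toList.length - 2 - y)) (pvS s.toList s.toList.length - pvS s.toList (s.toList.length - 1)) (s.toList.length - 2 - k) := by
      rw [show ((k : Int) + 1) = ((k + 1 : Nat) : Int) by push_cast; ring]
      rw [PySem.List.pyGetD_natCast]
      rw [List.getD_eq_getElem _ _ (by simp only [List.length_reverse, List.length_map, List.length_range]; omega)]
      rw [List.getElem_reverse, List.getElem_map, List.getElem_range]
      congr 1
      simp only [List.length_map, List.length_range]
      omega
    rw [hL1, hR1, pvmaxF s.toList k, pvmaxR s.toList (s.toList.length - 2 - k) (by omega),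
      show s.toList.length - 2 - k + 1 = s.toList.length - 1 - k by omega]

-- ===== VERDICT (by name: the statement is the Claim_ definition above) =====
theorem minimumTime2_spec : Claim_equal_minimumTime2 := by
  intro s _ hpre
  unfold Spec_minimumTime2
  have hne : s.toList ≠ [] := fun hh => hpre (String.toList_eq_nil_iff.mp hh)
  have hpos : 1 ≤ s.toList.length := by
    cases h : s.toList with
    | nil => exact absurd h hne
    | cons a t => simp
  rcases Nat.lt_or_ge s.toList.length 2 with hlt | hge
  · -- length 1: A's special branch
    have h1 : s.toList.length = 1 := by omega
    obtain ⟨c, hc⟩ : ∃ c, s.toList = [c] := by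
      cases h : s.toList with
      | nil => exact absurd h hne
      | cons a t =>
        rw [h] at h1
        simp only [List.length_cons] at h1
        have ht : t = [] := by
          rw [← List.length_eq_zero_iff]
          omega
        exact ⟨a, by rw [ht]⟩
    rw [portB_eq]
    unfold minimumTime2
    rw [PySem.Str.len_eq, if_pos (by exact_mod_cast h1)]
    by_cases hs : s = "1"
    · rw [if_pos hs]
      have hc1 : s.toList = ['1'] := by rw [hs]; rfl
      rw [hc1, show ((['1'] : List Char).length) = 1 from rfl]
      decide
    · rw [if_neg hs]
      have hcne : c ≠ '1' := by
        intro h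
        apply hs
        apply String.toList_inj.mp
        rw [hc, h]; rfl
      rw [hc, show (([c] : List Char).length) = 1 from rfl]
      have : pvMn [c] 1 = min (pvMn [c] 0) (pvS [c] 1 - pvF [c] 1) := rfl
      rw [this]
      have hS : pvS [c] 1 = -1 := by simp [pvS, pvW, hcne]
      have hF : pvF [c] 1 = max (pvF [c] 0) (pvS [c] 1) := rfl
      rw [show pvMn [c] 0 = 0 from rfl, show pvF [c] 0 = 0 from rfl] at *
      rw [hF, hS]
      norm_num
  · rw [portA_eq s hge, portB_eq, pv_key s.toList hge]
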